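-- pv_equiv track=rewrite | github.com/SketchOTP/animus | animus-chat/server.py | _merge_projects_onto_client
-- ===== SOURCE A (Python) =====
-- def _normalize_sync_path(raw: object) -> str:
--     """Normalize path keys to match desktop/mobile project rows reliably."""
--     return str(raw or "").strip().rstrip("/")
--
-- def _project_merge_key(project: dict) -> str:
--     """Stable dedupe key shared by desktop/mobile clients."""
--     if not isinstance(project, dict):
--         return ""
--     path_key = _normalize_sync_path(project.get("path"))
--     if path_key:
--         return f"path:{path_key.lower()}"
--     pid = str(project.get("id") or "").strip()
--     if pid:
--         return f"id:{pid.lower()}"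
--     return ""
--
-- def _merge_projects_onto_client(disk: list, incoming: list) -> list:
--     """Merge server + client project lists to avoid stale-client clobbering.
--
--     Multiple clients (desktop/mobile) can keep stale in-memory lists. If one client
--     posts a full list directly, it can accidentally delete projects created from the
--     other device. We merge by normalized path (primary) and id (fallback), with
--     incoming values taking precedence on overlapping rows while preserving unmatched
--     rows from both sides.
--
--     **Order:** ``incoming`` array order wins for all keys it contains (e.g. drag
--     reorder); keys only present on ``disk`` are appended after, in disk order.
--     """
--     if not isinstance(disk, list):
--         disk = []
--     if not isinstance(incoming, list):
--         return disk
--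
--     latest: dict[str, dict] = {}
--
--     def absorb(project: dict) -> None:
--         if not isinstance(project, dict):
--             return
--         key = _project_merge_key(project)
--         if not key:
--             return
--         prev = latest.get(key)
--         latest[key] = {**(prev or {}), **dict(project)}
--
--     for row in disk:
--         absorb(row)
--     for row in incoming:
--         absorb(row)
--
--     ordered_keys: list[str] = []
--     seen: set[str] = set()
--     for row in incoming:
--         if not isinstance(row, dict):
--             continue
--         key = _project_merge_key(row)
--         if key and key not in seen:
--             seen.add(key)
--             ordered_keys.append(key)
--     for row in disk:
--         if not isinstance(row, dict):
--             continue
--         key = _project_merge_key(row)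
--         if key and key not in seen:
--             seen.add(key)
--             ordered_keys.append(key)
--
--     return [latest[k] for k in ordered_keys if k in latest]
-- ===== SOURCE B (Python) =====
-- def _normalize_sync_path(raw: object) -> str:
--     return str(raw or "").strip().rstrip("/")
--
-- def _project_merge_key(project: dict) -> str:
--     if not isinstance(project, dict):
--         return ""
--     path_key = _normalize_sync_path(project.get("path"))
--     if path_key:
--         return f"path:{path_key.lower()}"
--     pid = str(project.get("id") or "").strip()
--     if pid:
--         return f"id:{pid.lower()}"
--     return ""
--
-- def _merge_projects_onto_client(disk: list, incoming: list) -> list: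
--     """Group-by-rescan rewrite: no accumulator dict of dicts; for each output key
--     (incoming first-occurrence order, then disk-only keys) re-scan the keyed rows
--     and fold their fields left to right, so incoming fields override disk fields."""
--     if not isinstance(disk, list):
--         disk = []
--     if not isinstance(incoming, list):
--         return disk
--
--     rows = [r for r in disk + incoming
--             if isinstance(r, dict) and _project_merge_key(r)]
--
--     order: list[str] = []
--     for r in incoming + disk:
--         if not isinstance(r, dict):
--             continue
--         k = _project_merge_key(r)
--         if k and k not in order:
--             order.append(k)
--
--     result = []
--     for k in order:
--         merged: dict = {}
--         for r in rows:
--             if _project_merge_key(r) == k: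
--                 merged.update(r)
--         result.append(merged)
--     return result
-- ===== Notes on version B (the rewrite author's own statement) =====
-- stated objective: alternative
-- what changed: Replaces A's incrementally updated dict-of-dicts accumulator (absorb closure) and seen-set ordering pass by a group-by-rescan: compute the key order with plain list membership, then for each output key re-scan the keyed rows once and fold their fields left to right; no per-key accumulator dict is kept.
import Mathlib
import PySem

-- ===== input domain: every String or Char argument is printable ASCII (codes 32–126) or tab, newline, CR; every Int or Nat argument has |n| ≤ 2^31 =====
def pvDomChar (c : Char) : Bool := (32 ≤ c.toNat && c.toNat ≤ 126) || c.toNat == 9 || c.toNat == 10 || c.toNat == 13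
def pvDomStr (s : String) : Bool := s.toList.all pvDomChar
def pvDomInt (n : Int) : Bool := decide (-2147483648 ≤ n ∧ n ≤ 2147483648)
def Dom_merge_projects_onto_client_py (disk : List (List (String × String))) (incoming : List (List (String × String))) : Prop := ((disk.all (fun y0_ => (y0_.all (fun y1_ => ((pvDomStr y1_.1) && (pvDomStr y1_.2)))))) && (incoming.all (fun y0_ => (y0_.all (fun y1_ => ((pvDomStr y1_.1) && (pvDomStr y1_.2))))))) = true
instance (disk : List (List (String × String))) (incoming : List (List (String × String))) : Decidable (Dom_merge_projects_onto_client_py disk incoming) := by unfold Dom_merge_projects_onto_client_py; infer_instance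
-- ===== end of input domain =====

-- B replaces A's global dict-of-dicts accumulator by a per-key rescan of the keyed
-- rows (group-by-filter), same return value; objective: alternative (not faster).

-- ===== SHARED HELPERS (the same Python helpers appear verbatim in Source A and Source B) =====

-- project.get(k): first-match lookup on the row's items
def pvRowGet (row : List (String × String)) (k : String) : Option String :=
  (PySem.Dict.mk row).get? k

-- str.rstrip("/"): hand port (PySem has no rstrip-with-chars); exact for the single char '/'
def pvRstripSlash (s : String) : String :=
  String.ofList ((s.toList.reverse.dropWhile (· == '/')).reverse)

-- _project_merge_key (row is always a dict here, so the isinstance guard is vacuous)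
def pvKey (row : List (String × String)) : String :=
  let pathKey := pvRstripSlash (PySem.Str.strip ((pvRowGet row "path").getD ""))
  if pathKey ≠ "" then "path:" ++ PySem.Str.lower pathKey
  else
    let pid := PySem.Str.strip ((pvRowGet row "id").getD "")
    if pid ≠ "" then "id:" ++ PySem.Str.lower pid else ""

-- {**d, **row}: update d with row's fields, last writer wins, position kept
def pvUpd (d : PySem.Dict String String) (row : List (String × String)) : PySem.Dict String String :=
  row.foldl (fun d p => d.insert p.1 p.2) d

-- ===== PORT A =====
-- (the isinstance guards of A are vacuous under the typed signature)

-- absorb(project): latest[key] = {**(latest.get(key) or {}), **dict(project)}, skipping empty keys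
def pvAbsorb (latest : PySem.Dict String (PySem.Dict String String)) (row : List (String × String)) :
    PySem.Dict String (PySem.Dict String String) :=
  let k := pvKey row
  if k = "" then latest
  else latest.insert k (pvUpd ((latest.get? k).getD PySem.Dict.empty) row)

-- ordered_keys loop body: seen set + ordered list
def pvOrderStepA (st : PySem.Set String × List String) (row : List (String × String)) :
    PySem.Set String × List String :=
  let k := pvKey row
  if k ≠ "" ∧ k ∉ st.1 then (PySem.Set.add st.1 k, st.2 ++ [k]) else st

def merge_projects_onto_client_py (disk : List (List (String × String))) (incoming : List (List (String × String))) : List (List (String × String)) :=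
  let latest := incoming.foldl pvAbsorb (disk.foldl pvAbsorb PySem.Dict.empty)
  let st := disk.foldl pvOrderStepA (incoming.foldl pvOrderStepA (([] : PySem.Set String), ([] : List String)))
  -- [latest[k] for k in ordered_keys if k in latest]
  st.2.filterMap (fun k => (latest.get? k).map PySem.Dict.items)

-- ===== PORT B =====

-- order loop body: list membership instead of a seen set
def pvOrderStepB (o : List String) (row : List (String × String)) : List String :=
  let k := pvKey row
  if k ≠ "" ∧ k ∉ o then o ++ [k] else o

def merge_projects_onto_client_py_alt (disk : List (List (String × String))) (incoming : List (List (String × String))) : List (List (String × String)) :=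
  let rows := (disk ++ incoming).filter (fun r => decide (pvKey r ≠ ""))
  let order := (incoming ++ disk).foldl pvOrderStepB []
  order.map (fun k =>
    (rows.foldl (fun m r => if pvKey r = k then pvUpd m r else m) PySem.Dict.empty).items)

-- ===== PRECONDITION & SPEC =====
def Spec_merge_projects_onto_client_py (disk : List (List (String × String))) (incoming : List (List (String × String))) (out : List (List (String × String))) : Prop := out = merge_projects_onto_client_py_alt disk incoming
instance (disk : List (List (String × String))) (incoming : List (List (String × String))) (out : List (List (String × String))) : Decidable (Spec_merge_projects_onto_client_py disk incoming out) := by unfold Spec_merge_projects_onto_client_py; infer_instance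

-- ===== CLAIM (what is proved, stated in full; the proofs are below) =====
def Claim_equal_merge_projects_onto_client_py : Prop := ∀ (disk : List (List (String × String))) (incoming : List (List (String × String))), Dom_merge_projects_onto_client_py disk incoming → Spec_merge_projects_onto_client_py disk incoming (merge_projects_onto_client_py disk incoming)

-- ===== LEMMAS AND PROOFS =====

-- A's seen-set ordering pass equals B's list-membership ordering pass
theorem pv_order_eq (l : List (List (String × String))) :
    ∀ (s : PySem.Set String) (o : List String), (∀ x, x ∈ s ↔ x ∈ o) →
      (l.foldl pvOrderStepA (s, o)).2 = l.foldl pvOrderStepB o := by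
  induction l with
  | nil => intro s o _; rfl
  | cons r l ih =>
    intro s o hinv
    simp only [List.foldl_cons]
    by_cases hc : pvKey r ≠ "" ∧ pvKey r ∉ o
    · rw [show pvOrderStepA (s, o) r = (PySem.Set.add s (pvKey r), o ++ [pvKey r]) by
        simp only [pvOrderStepA]
        rw [if_pos ⟨hc.1, fun h => hc.2 ((hinv _).1 h)⟩],
        show pvOrderStepB o r = o ++ [pvKey r] by
        simp only [pvOrderStepB]; rw [if_pos hc]]
      exact ih _ _ (fun x => by
        rw [PySem.Set.mem_add, List.mem_append, List.mem_singleton, hinv x])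
    · rw [show pvOrderStepA (s, o) r = (s, o) by
        simp only [pvOrderStepA]
        rw [if_neg (fun h => hc ⟨h.1, fun hm => h.2 ((hinv _).2 hm)⟩)],
        show pvOrderStepB o r = o by simp only [pvOrderStepB]; rw [if_neg hc]]
      exact ih _ _ hinv

-- every key produced by the ordering pass is nonempty and comes from some row
theorem pv_order_sound (l : List (List (String × String))) :
    ∀ (o : List String) (x : String), x ∈ l.foldl pvOrderStepB o →
      x ∈ o ∨ (x ≠ "" ∧ ∃ r ∈ l, pvKey r = x) := by
  induction l with
  | nil => intro o x hx; exact Or.inl hx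
  | cons r l ih =>
    intro o x hx
    simp only [List.foldl_cons] at hx
    rcases ih _ _ hx with h | ⟨hne, rr, hrr, hk⟩
    · simp only [pvOrderStepB] at h
      split at h
      · rcases List.mem_append.1 h with h' | h'
        · exact Or.inl h'
        · rename_i hc
          refine Or.inr ⟨?_, r, List.mem_cons_self, (List.mem_singleton.1 h').symm⟩
          rw [← List.mem_singleton.1 h'] at hc; exact hc.1
      · exact Or.inl h
    · exact Or.inr ⟨hne, rr, List.mem_cons_of_mem _ hrr, hk⟩

-- the absorb fold seen through get? at a fixed nonempty key
theorem pv_absorb_get (k : String) (hk : k ≠ "") (l : List (List (String × String))) :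
    ∀ (d : PySem.Dict String (PySem.Dict String String)),
      ((l.foldl pvAbsorb d).get? k) =
        (l.filter (fun r => pvKey r == k)).foldl
          (fun o r => some (pvUpd (o.getD PySem.Dict.empty) r)) (d.get? k) := by
  induction l with
  | nil => intro d; rfl
  | cons r l ih =>
    intro d
    simp only [List.foldl_cons, List.filter_cons]
    by_cases h0 : pvKey r = ""
    · rw [show pvAbsorb d r = d by simp only [pvAbsorb]; rw [if_pos h0]]
      rw [show (pvKey r == k) = false by
        rw [h0]; simp only [beq_eq_false_iff_ne]; exact fun h => hk h.symm]
      simp only [Bool.false_eq_true, ite_false]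
      exact ih d
    · by_cases he : pvKey r = k
      · rw [show pvAbsorb d r = d.insert k (pvUpd ((d.get? k).getD PySem.Dict.empty) r) by
          simp only [pvAbsorb]; rw [if_neg h0, he]]
        rw [show (pvKey r == k) = true by simp [he]]
        simp only [ite_true]
        rw [ih, PySem.Dict.get?_insert_self]
        rfl
      · rw [show pvAbsorb d r = d.insert (pvKey r) (pvUpd ((d.get? (pvKey r)).getD PySem.Dict.empty) r) by
          simp only [pvAbsorb]; rw [if_neg h0]]
        rw [show (pvKey r == k) = false by simp [he]]
        simp only [Bool.false_eq_true, ite_false]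
        rw [ih, PySem.Dict.get?_insert_of_ne _ _ (fun h => he h.symm)]

-- the option-valued fold over a nonempty list is some of the plain fold
theorem pv_optfold_some (l : List (List (String × String))) :
    ∀ m, l.foldl (fun o r => some (pvUpd (o.getD PySem.Dict.empty) r)) (some m) =
      some (l.foldl pvUpd m) := by
  induction l with
  | nil => intro m; rfl
  | cons r l ih => intro m; simp only [List.foldl_cons, Option.getD_some]; exact ih _

theorem pv_optfold_ne_nil (l : List (List (String × String))) (h : l ≠ []) :
    l.foldl (fun o r => some (pvUpd (o.getD PySem.Dict.empty) r)) none =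
      some (l.foldl pvUpd PySem.Dict.empty) := by
  cases l with
  | nil => exact absurd rfl h
  | cons r l => simp only [List.foldl_cons, Option.getD_none]; exact pv_optfold_some l _

-- B's guarded inner fold is the plain fold over the filtered rows
theorem pv_guard_filter (k : String) (l : List (List (String × String))) :
    ∀ m, l.foldl (fun m r => if pvKey r = k then pvUpd m r else m) m =
      (l.filter (fun r => pvKey r == k)).foldl pvUpd m := by
  induction l with
  | nil => intro m; simp only [List.foldl_nil, List.filter_nil]
  | cons r l ih =>
    intro m
    simp only [List.foldl_cons, List.filter_cons]
    by_cases h : pvKey r = k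
    · rw [if_pos h, show (pvKey r == k) = true by simp [h]]
      simp only [ite_true, List.foldl_cons]; exact ih _
    · rw [if_neg h, show (pvKey r == k) = false by simp [h]]
      simp only [Bool.false_eq_true, ite_false]; exact ih _

theorem pv_filterMap_eq_map {α β : Type} (l : List α) (f : α → Option β) (g : α → β)
    (h : ∀ x ∈ l, f x = some (g x)) : l.filterMap f = l.map g := by
  induction l with
  | nil => rfl
  | cons a l ih =>
    simp only [List.filterMap_cons, List.map_cons, h a List.mem_cons_self]
    exact congrArg _ (ih (fun x hx => h x (List.mem_cons_of_mem _ hx)))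

-- ===== VERDICT (by name: the statement is the Claim_ definition above) =====
theorem merge_projects_onto_client_py_spec : Claim_equal_merge_projects_onto_client_py := by
  intro disk incoming _
  show merge_projects_onto_client_py disk incoming = merge_projects_onto_client_py_alt disk incoming
  unfold merge_projects_onto_client_py merge_projects_onto_client_py_alt
  simp only [← List.foldl_append]
  rw [pv_order_eq (incoming ++ disk) [] [] (fun x => Iff.rfl)]
  apply pv_filterMap_eq_map
  intro k hk
  rcases pv_order_sound (incoming ++ disk) [] k hk with h | ⟨hne, r, hr, hkey⟩
  · exact absurd h (List.not_mem_nil)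
  · have hr' : r ∈ (disk ++ incoming).filter (fun r => pvKey r == k) := by
      refine List.mem_filter.2 ⟨?_, by simp [hkey]⟩
      rcases List.mem_append.1 hr with h | h
      · exact List.mem_append.2 (Or.inr h)
      · exact List.mem_append.2 (Or.inl h)
    have hfil : (disk ++ incoming).filter (fun r => pvKey r == k) ≠ [] :=
      fun hemp => by rw [hemp] at hr'; exact List.not_mem_nil hr'
    rw [pv_absorb_get k hne (disk ++ incoming) PySem.Dict.empty, PySem.Dict.get?_empty,
      pv_optfold_ne_nil _ hfil]
    rw [pv_guard_filter k]
    have hff : ((disk ++ incoming).filter (fun r => decide (pvKey r ≠ ""))).filter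
        (fun r => pvKey r == k) = (disk ++ incoming).filter (fun r => pvKey r == k) := by
      rw [List.filter_filter]
      apply List.filter_congr
      intro r _
      by_cases h : pvKey r = k
      · simp [h, hne]
      · simp [h]
    rw [hff]
    rfl
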